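-- pv_equiv track=rewrite | github.com/XinweiChai/LCG-in-ASP | revision/util.py | consistent_model
-- ===== SOURCE A (Python) =====
-- def state_change(trans):
--     for i in trans[0]:
--         for j in trans[1]:
--             if i != j:
--                 return i
--     return None
--
-- def consistent_trans(trans, rules):
--     for i in rules:
--         if i[0] == state_change(trans) and set(i[1]) <= set(trans[1]):
--             return True
--     return False
--
-- def consistent_model(p, tsd):  # see if all the transitions can be explained by rules
--     for i in tsd:
--         flag = False
--         for j in p:
--             if consistent_trans(i, j):
--                 flag = True
--                 break
--         if not flag:
--             return False
--     return True
-- ===== SOURCE B (Python) =====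
-- def consistent_model(p, tsd):
--     # Index all rules (across all rule sets) by their head state once,
--     # and compute state_change / the target set once per transition.
--     index = {}
--     for grp in p:
--         for head, body in grp:
--             index.setdefault(head, []).append(body)
--     for states, targets in tsd:
--         ts = set(targets)
--         sc = next((x for x in states if any(y != x for y in targets)), None)
--         if not any(set(body) <= ts for body in index.get(sc, [])):
--             return False
--     return True
-- ===== Notes on version B (the rewrite author's own statement) =====
-- stated objective: faster
-- what changed: B builds a dict indexing every rule body by its head state once up front, then checks each transition with a single state_change computation, one set(targets), and one indexed lookup, instead of rescanning all rule sets and recomputing state_change and set(trans[1]) for every rule.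
import Mathlib
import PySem

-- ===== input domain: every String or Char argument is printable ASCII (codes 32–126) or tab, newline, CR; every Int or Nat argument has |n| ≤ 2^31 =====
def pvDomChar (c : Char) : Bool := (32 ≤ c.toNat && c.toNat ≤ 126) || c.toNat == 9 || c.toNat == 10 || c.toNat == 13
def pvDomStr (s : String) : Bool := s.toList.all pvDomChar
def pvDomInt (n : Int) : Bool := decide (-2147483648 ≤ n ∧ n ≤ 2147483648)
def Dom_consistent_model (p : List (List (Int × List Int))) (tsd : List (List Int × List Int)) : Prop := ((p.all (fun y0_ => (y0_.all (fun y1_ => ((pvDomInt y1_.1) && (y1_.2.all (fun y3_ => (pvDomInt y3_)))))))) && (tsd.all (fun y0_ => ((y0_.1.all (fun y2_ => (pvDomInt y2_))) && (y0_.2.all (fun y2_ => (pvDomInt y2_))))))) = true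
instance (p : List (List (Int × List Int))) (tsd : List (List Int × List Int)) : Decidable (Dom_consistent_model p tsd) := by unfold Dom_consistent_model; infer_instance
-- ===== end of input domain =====

-- B indexes all rules by head state once and hoists state_change/set out of the rule loop
-- (objective: faster; same return value as A).

-- ===== PORT A =====
-- inner loop of state_change: 'for j in trans[1]: if i != j: return i'
def sc_inner (i : Int) : List Int → Bool
  | [] => false
  | j :: rest => if i != j then true else sc_inner i rest

-- outer loop of state_change: 'for i in trans[0]: …; return None'
def state_change_aux : List Int → List Int → Option Int
  | _, [] => none
  | ys, i :: rest => if sc_inner i ys then some i else state_change_aux ys rest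

def state_change (trans : List Int × List Int) : Option Int :=
  state_change_aux trans.2 trans.1

-- 'for i in rules: if i[0] == state_change(trans) and set(i[1]) <= set(trans[1]): return True; return False'
-- (int == None is False, hence 'some r.1 == state_change trans')
def consistent_trans (trans : List Int × List Int) : List (Int × List Int) → Bool
  | [] => false
  | r :: rest =>
    if (some r.1 == state_change trans) &&
       PySem.Set.issubset (PySem.Set.ofList r.2) (PySem.Set.ofList trans.2)
    then true else consistent_trans trans rest

-- inner loop of consistent_model over p, with break (flag)
def cm_flag (t : List Int × List Int) : List (List (Int × List Int)) → Bool
  | [] => false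
  | g :: gs => if consistent_trans t g then true else cm_flag t gs

def cm_loop (p : List (List (Int × List Int))) : List (List Int × List Int) → Bool
  | [] => true
  | t :: rest => if cm_flag t p then cm_loop p rest else false

def consistent_model (p : List (List (Int × List Int))) (tsd : List (List Int × List Int)) : Bool :=
  cm_loop p tsd

-- ===== PORT B =====
-- 'index.setdefault(head, []).append(body)' grouping loop, nested over the rule sets
def cmB_index (p : List (List (Int × List Int))) : PySem.Dict Int (List (List Int)) :=
  p.foldl (fun d grp => grp.foldl (fun d r => d.modify r.1 [] (· ++ [r.2])) d) PySem.Dict.empty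

-- per-transition check: ts = set(targets); sc = next((x for x in states if any(y != x …)), None);
-- any(set(body) <= ts for body in index.get(sc, []))  ('index.get(None, [])' is [])
def cmB_check (index : PySem.Dict Int (List (List Int))) (t : List Int × List Int) : Bool :=
  let ts := PySem.Set.ofList t.2
  let sc := t.1.find? (fun x => t.2.any (fun y => y != x))
  (match sc with
   | some k => index.getD k []
   | none => []).any (fun body => PySem.Set.issubset (PySem.Set.ofList body) ts)

def cmB_loop (index : PySem.Dict Int (List (List Int))) : List (List Int × List Int) → Bool
  | [] => true
  | t :: rest => if !(cmB_check index t) then false else cmB_loop index rest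

def consistent_model_alt (p : List (List (Int × List Int))) (tsd : List (List Int × List Int)) : Bool :=
  cmB_loop (cmB_index p) tsd

-- ===== PRECONDITION & SPEC =====
def Spec_consistent_model (p : List (List (Int × List Int))) (tsd : List (List Int × List Int)) (out : Bool) : Prop := out = consistent_model_alt p tsd
instance (p : List (List (Int × List Int))) (tsd : List (List Int × List Int)) (out : Bool) : Decidable (Spec_consistent_model p tsd out) := by unfold Spec_consistent_model; infer_instance

-- ===== CLAIM (what is proved, stated in full; the proofs are below) =====
def Claim_equal_consistent_model : Prop := ∀ (p : List (List (Int × List Int))) (tsd : List (List Int × List Int)), Dom_consistent_model p tsd → Spec_consistent_model p tsd (consistent_model p tsd)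

-- ===== LEMMAS AND PROOFS =====

theorem sc_inner_eq (i : Int) (ys : List Int) :
    sc_inner i ys = ys.any (fun y => y != i) := by
  induction ys with
  | nil => rfl
  | cons j rest ih =>
    simp only [sc_inner, List.any_cons, ih]
    by_cases h : i = j
    · subst h; simp
    · simp [h, Ne.symm h]

theorem state_change_aux_eq (ys xs : List Int) :
    state_change_aux ys xs = xs.find? (fun x => ys.any (fun y => y != x)) := by
  induction xs with
  | nil => rfl
  | cons i rest ih =>
    simp only [state_change_aux, sc_inner_eq, List.find?, ih]
    by_cases h : ys.any (fun y => y != i) = true <;> simp [h]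

theorem consistent_trans_eq (t : List Int × List Int) (g : List (Int × List Int)) :
    consistent_trans t g = g.any (fun r =>
      (some r.1 == state_change t) &&
      PySem.Set.issubset (PySem.Set.ofList r.2) (PySem.Set.ofList t.2)) := by
  induction g with
  | nil => rfl
  | cons r rest ih =>
    simp only [consistent_trans, List.any_cons, ih]
    split <;> simp_all

theorem cm_flag_eq (t : List Int × List Int) (p : List (List (Int × List Int))) :
    cm_flag t p = p.any (fun g => consistent_trans t g) := by
  induction p with
  | nil => rfl
  | cons g gs ih =>
    simp only [cm_flag, List.any_cons, ih]
    split <;> simp_all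

theorem cmB_index_getD (p : List (List (Int × List Int))) (k : Int) :
    (cmB_index p).getD k [] =
      ((p.flatten).filter (fun r => r.1 == k)).map Prod.snd := by
  unfold cmB_index
  rw [← List.foldl_flatten]
  rw [PySem.Dict.getD_foldl_modify_append]
  simp

theorem cmB_check_eq (p : List (List (Int × List Int))) (t : List Int × List Int) :
    cmB_check (cmB_index p) t = cm_flag t p := by
  rw [cm_flag_eq]
  unfold cmB_check
  simp only [← state_change_aux_eq]
  have hflat : (p.any (fun g => consistent_trans t g)) =
      (p.flatten).any (fun r =>
        (some r.1 == state_change t) &&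
        PySem.Set.issubset (PySem.Set.ofList r.2) (PySem.Set.ofList t.2)) := by
    simp only [consistent_trans_eq, List.any_flatten]
  rw [hflat]
  show ((match state_change t with
        | some k => (cmB_index p).getD k []
        | none => []).any _) = _
  cases hsc : state_change t with
  | none =>
    symm
    simp
  | some k =>
    show ((cmB_index p).getD k []).any _ = _
    rw [cmB_index_getD, List.any_map, List.any_filter]
    refine List.any_congr rfl (fun r => ?_)
    by_cases h : r.1 = k <;> simp [h]

theorem cm_loops_eq (p : List (List (Int × List Int))) (tsd : List (List Int × List Int)) :
    cm_loop p tsd = cmB_loop (cmB_index p) tsd := by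
  induction tsd with
  | nil => rfl
  | cons t rest ih =>
    simp only [cm_loop, cmB_loop, cmB_check_eq]
    cases h : cm_flag t p <;> simp [ih]

-- ===== VERDICT (by name: the statement is the Claim_ definition above) =====
theorem consistent_model_spec : Claim_equal_consistent_model := by
  intro p tsd _
  unfold Spec_consistent_model consistent_model consistent_model_alt
  exact cm_loops_eq p tsd
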